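-- pv_equiv track=rewrite | github.com/JiniousChoi/encyclopedia-in-code | quizzes/codejam/2019/01.foregone_solution/solution.py | solve
-- ===== SOURCE A (Python) =====
-- M = { '0': ('0','0'),
--       '1': ('1','0'),
--       '2': ('1','1'),
--       '3': ('2','1'),
--       '4': ('2','2'),
--       '5': ('3','2'),
--       '6': ('3','3'),
--       '7': ('2','5'),
--       '8': ('3','5'),
--       '9': ('3','6') }
--
-- def solve(n : int):
--     s = str(n)
--     s1, s2 = [], []
--     for c in s:
--         c1, c2 = M[c]
--         s1.append(c1)
--         s2.append(c2)
--     return (int(''.join(s1)), int(''.join(s2)))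
-- ===== SOURCE B (Python) =====
-- # Arithmetic re-implementation: no strings at all.  A walks str(n) with a dict of
-- # digit PAIRS building two character lists; B peels digits off n with divmod,
-- # accumulating only the FIRST summand from a per-digit table, and returns the
-- # second summand as n - a (valid because each table pair sums to its digit, so
-- # the split is carry-free).
-- _F = (0, 1, 1, 2, 2, 3, 3, 2, 3, 3)  # first-summand digit for each digit 0..9
--
-- def solve(n: int):
--     a, p, m = 0, 1, n
--     while m > 0:
--         a += _F[m % 10] * p
--         m //= 10
--         p *= 10
--     return (a, n - a)
-- ===== Notes on version B (the rewrite author's own statement) =====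
-- stated objective: alternative
-- what changed: A converts n to a string and builds two digit-character lists via a dict of pairs, then parses both back with int(); B never touches strings: it peels digits off n arithmetically with divmod, accumulates only the first summand from a digit table, and obtains the second summand as n - a, exploiting that the digit split is carry-free.
import Mathlib
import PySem

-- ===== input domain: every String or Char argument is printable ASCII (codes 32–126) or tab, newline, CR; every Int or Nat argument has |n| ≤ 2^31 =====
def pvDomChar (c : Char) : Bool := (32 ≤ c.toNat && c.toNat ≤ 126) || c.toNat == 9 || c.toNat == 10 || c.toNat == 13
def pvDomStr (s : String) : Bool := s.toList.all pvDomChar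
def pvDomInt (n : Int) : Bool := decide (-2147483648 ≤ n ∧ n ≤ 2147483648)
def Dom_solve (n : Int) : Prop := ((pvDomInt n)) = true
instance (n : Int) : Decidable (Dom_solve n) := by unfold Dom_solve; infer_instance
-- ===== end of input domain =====

-- B replaces A's string walk over a dict of digit pairs by a pure divmod loop that
-- accumulates only the first summand and returns the second as n - a (the split is
-- carry-free); return values only, no side effects in either program.

-- ===== PORT A =====
-- the module-level dict M
def solveM : PySem.Dict Char (Char × Char) :=
  PySem.Dict.ofList [('0',('0','0')),('1',('1','0')),('2',('1','1')),('3',('2','1')),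
                     ('4',('2','2')),('5',('3','2')),('6',('3','3')),('7',('2','5')),
                     ('8',('3','5')),('9',('3','6'))]

-- A's for-loop, threading the two accumulator lists; none = KeyError from M[c]
def solveLoop : List Char → List Char → List Char → Option (List Char × List Char)
  | [], s1, s2 => some (s1, s2)
  | c :: cs, s1, s2 =>
    match solveM.get? c with
    | none => none
    | some (c1, c2) => solveLoop cs (s1 ++ [c1]) (s2 ++ [c2])

-- hand port of int(''.join(l)): the joined list is always a nonempty string of ASCII
-- digits taken from M's table, and on such strings Python's int() is exactly this
-- left fold (no sign/space/underscore case is reachable); exact there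
def intOfDigits (cs : List Char) : Int :=
  cs.foldl (fun a c => a * 10 + ((c.toNat : Int) - 48)) 0

def solve (n : Int) : Int × Int :=
  let s := PySem.Int.toChars n
  match solveLoop s [] [] with
  | none => (0, 0)  -- Python raises KeyError here (only when n < 0); outside Pre_solve
  | some (s1, s2) => (intOfDigits s1, intOfDigits s2)

-- ===== PORT B =====
-- the tuple _F of Source B
def solveF : List Int := [0, 1, 1, 2, 2, 3, 3, 2, 3, 3]

-- Source B's while-loop; _F[m % 10] is always in range (0 ≤ m % 10 < 10), so the
-- IndexError arm of pyGet? is unreachable and .getD 0 is exact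
def solveAltLoop (a p m : Int) : Int :=
  if 0 < m then
    solveAltLoop (a + (PySem.List.pyGet? solveF (PySem.Int.mod m 10)).getD 0 * p)
      (p * 10) (PySem.Int.floordiv m 10)
  else a
termination_by m.toNat
decreasing_by
  rw [PySem.Int.floordiv_eq_ediv_of_pos (by norm_num)]
  omega

def solve_alt (n : Int) : Int × Int :=
  let a := solveAltLoop 0 1 n
  (a, n - a)

-- ===== PRECONDITION & SPEC =====
-- Pre_ excludes exactly the negative n, on which A raises KeyError('-') at the sign character
def Pre_solve (n : Int) : Prop := 0 ≤ n
instance (n : Int) : Decidable (Pre_solve n) := by unfold Pre_solve; infer_instance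
def pvWitness_solve : Int := 7

def Spec_solve (n : Int) (out : Int × Int) : Prop := out = solve_alt n
instance (n : Int) (out : Int × Int) : Decidable (Spec_solve n out) := by unfold Spec_solve; infer_instance

-- ===== CLAIM (what is proved, stated in full; the proofs are below) =====
def Claim_equal_solve : Prop := ∀ (n : Int), Dom_solve n → Pre_solve n → Spec_solve n (solve n)

-- ===== LEMMAS AND PROOFS =====
def digitChars : List Char := ['0','1','2','3','4','5','6','7','8','9']

-- the two digit-wise projections of M, as char maps (proof-side only)
def s1Map (c : Char) : Char :=
  match c with
  | '0' => '0' | '1' => '1' | '2' => '1' | '3' => '2' | '4' => '2'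
  | '5' => '3' | '6' => '3' | '7' => '2' | '8' => '3' | '9' => '3'
  | _ => c

def s2Map (c : Char) : Char :=
  match c with
  | '0' => '0' | '1' => '0' | '2' => '1' | '3' => '1' | '4' => '2'
  | '5' => '2' | '6' => '3' | '7' => '5' | '8' => '5' | '9' => '6'
  | _ => c

-- numeric digit tables, and the digit-wise images gN/hN of a number
def tab1 (d : Nat) : Nat := [0,1,1,2,2,3,3,2,3,3].getD d 0
def tab2 (d : Nat) : Nat := [0,0,1,1,2,2,3,5,5,6].getD d 0

def gN (m : Nat) : Nat :=
  if m = 0 then 0 else 10 * gN (m / 10) + tab1 (m % 10)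
decreasing_by exact Nat.div_lt_self (Nat.pos_of_ne_zero (by assumption)) (by norm_num)

def hN (m : Nat) : Nat :=
  if m = 0 then 0 else 10 * hN (m / 10) + tab2 (m % 10)
decreasing_by exact Nat.div_lt_self (Nat.pos_of_ne_zero (by assumption)) (by norm_num)

lemma toDigitsCore_digits (f : Nat) :
    ∀ (m : Nat) (acc : List Char), (∀ c ∈ acc, c ∈ digitChars) →
      ∀ c ∈ Nat.toDigitsCore 10 f m acc, c ∈ digitChars := by
  induction f with
  | zero => intro m acc hacc c hc; exact hacc c hc
  | succ f ih =>
    intro m acc hacc c hc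
    rw [Nat.toDigitsCore] at hc
    have hd : (m % 10).digitChar ∈ digitChars := by
      have : m % 10 < 10 := Nat.mod_lt _ (by norm_num)
      interval_cases h : m % 10 <;> decide
    by_cases h0 : m / 10 = 0
    · simp only [h0, ite_true] at hc
      rcases List.mem_cons.mp hc with h | h
      · exact h ▸ hd
      · exact hacc c h
    · simp only [h0, ite_false] at hc
      refine ih (m / 10) (_ :: acc) ?_ c hc
      intro x hx
      rcases List.mem_cons.mp hx with h | h
      · exact h ▸ hd
      · exact hacc x h

lemma toDigits_digits (m : Nat) : ∀ c ∈ Nat.toDigits 10 m, c ∈ digitChars :=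
  toDigitsCore_digits _ _ [] (by simp)

-- A's loop produces exactly the two digit-wise images of the input string
lemma solveLoop_eq :
    ∀ (s s1 s2 : List Char), (∀ c ∈ s, c ∈ digitChars) →
      solveLoop s s1 s2 = some (s1 ++ s.map s1Map, s2 ++ s.map s2Map) := by
  intro s
  induction s with
  | nil => intro s1 s2 _; simp [solveLoop]
  | cons c cs ih =>
    intro s1 s2 h
    have hc : c ∈ digitChars := h c (by simp)
    have hcs : ∀ x ∈ cs, x ∈ digitChars := fun x hx => h x (List.mem_cons_of_mem _ hx)
    fin_cases hc <;> simp [solveLoop, ih _ _ hcs] <;> rfl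

-- the digit fold over a digit-wise image computes gN / hN
lemma fold_map_eq (f : Char → Char) (tab : Nat → Nat) (gg : Nat → Nat)
    (hgg : ∀ m, gg m = if m = 0 then 0 else 10 * gg (m / 10) + tab (m % 10))
    (htab0 : tab 0 = 0)
    (hf : ∀ d : Nat, d < 10 → ((f d.digitChar).toNat : Int) - 48 = (tab d : Int)) :
    ∀ m : Nat, intOfDigits ((Nat.toDigits 10 m).map f) = (gg m : Int) := by
  intro m
  induction m using Nat.strong_induction_on with
  | _ m ih =>
    rw [Nat.toDigits_eq_if (by norm_num)]
    have hm10 : m % 10 < 10 := Nat.mod_lt _ (by norm_num)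
    by_cases h : m < 10
    · rw [if_pos h]
      have hone : intOfDigits [f m.digitChar] = ((f m.digitChar).toNat : Int) - 48 := by
        simp [intOfDigits]
      simp only [List.map_cons, List.map_nil, hone, hf m h]
      by_cases h0 : m = 0
      · subst h0; rw [hgg]; simp [htab0]
      · rw [hgg, if_neg h0, hgg (m / 10), if_pos (by omega), Nat.mod_eq_of_lt h]
        push_cast; ring
    · rw [if_neg h]
      have hrec := ih (m / 10) (Nat.div_lt_self (by omega) (by norm_num))
      simp only [List.map_append, List.map_cons, List.map_nil]
      rw [show intOfDigits (((Nat.toDigits 10 (m / 10)).map f) ++ [f (m % 10).digitChar])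
          = intOfDigits ((Nat.toDigits 10 (m / 10)).map f) * 10
            + (((f (m % 10).digitChar).toNat : Int) - 48) by
        simp [intOfDigits, List.foldl_append]]
      rw [hrec, hf _ hm10, hgg m, if_neg (by omega)]
      push_cast; ring

lemma hf1 : ∀ d : Nat, d < 10 → ((s1Map d.digitChar).toNat : Int) - 48 = (tab1 d : Int) := by
  intro d hd; interval_cases d <;> decide

lemma hf2 : ∀ d : Nat, d < 10 → ((s2Map d.digitChar).toNat : Int) - 48 = (tab2 d : Int) := by
  intro d hd; interval_cases d <;> decide

-- A's value, in closed digit-wise form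
lemma solve_eq_gh (n : Int) (h : 0 ≤ n) :
    solve n = ((gN n.toNat : Int), (hN n.toNat : Int)) := by
  show (match solveLoop (PySem.Int.toChars n) [] [] with
        | none => ((0 : Int), (0 : Int))
        | some (s1, s2) => (intOfDigits s1, intOfDigits s2)) = _
  have hs : PySem.Int.toChars n = Nat.toDigits 10 n.toNat := by
    unfold PySem.Int.toChars; rw [if_neg (by omega)]
  rw [hs, solveLoop_eq _ [] [] (toDigits_digits n.toNat)]
  simp only [List.nil_append]
  rw [fold_map_eq s1Map tab1 gN (fun m => by rw [gN]) (by decide) hf1,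
      fold_map_eq s2Map tab2 hN (fun m => by rw [hN]) (by decide) hf2]

-- B's loop computes gN
lemma solveAltLoop_eq : ∀ (m : Nat) (a p : Int), solveAltLoop a p (m : Int) = a + p * (gN m : Int) := by
  intro m
  induction m using Nat.strong_induction_on with
  | _ m ih =>
    intro a p
    by_cases h0 : m = 0
    · subst h0
      rw [solveAltLoop, if_neg (by norm_num), gN]
      simp
    · rw [solveAltLoop, if_pos (by exact_mod_cast Nat.pos_of_ne_zero h0)]
      rw [show PySem.Int.mod (↑m) 10 = ((m % 10 : Nat) : Int) from by
            exact_mod_cast PySem.Int.mod_natCast m 10,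
          show PySem.Int.floordiv (↑m) 10 = ((m / 10 : Nat) : Int) from by
            exact_mod_cast PySem.Int.floordiv_natCast m 10]
      rw [ih (m / 10) (Nat.div_lt_self (Nat.pos_of_ne_zero h0) (by norm_num))]
      have hm10 : m % 10 < 10 := Nat.mod_lt _ (by norm_num)
      have hF : (PySem.List.pyGet? solveF ((m % 10 : Nat) : Int)).getD 0 = (tab1 (m % 10) : Int) := by
        interval_cases h : m % 10 <;> decide
      rw [hF]
      conv_rhs => rw [gN]
      rw [if_neg h0]
      push_cast; ring

-- the two digit-wise images sum back to the number (the split is carry-free)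
lemma gN_add_hN : ∀ m : Nat, gN m + hN m = m := by
  intro m
  induction m using Nat.strong_induction_on with
  | _ m ih =>
    by_cases h0 : m = 0
    · subst h0; rw [gN, hN]; simp
    · rw [gN, hN, if_neg h0, if_neg h0]
      have hrec := ih (m / 10) (Nat.div_lt_self (Nat.pos_of_ne_zero h0) (by norm_num))
      have hm10 : m % 10 < 10 := Nat.mod_lt _ (by norm_num)
      have htab : tab1 (m % 10) + tab2 (m % 10) = m % 10 := by
        interval_cases h : m % 10 <;> decide
      omega

-- ===== VERDICT (by name: the statement is the Claim_ definition above) =====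
theorem solve_spec : Claim_equal_solve := by
  intro n _ hpre
  unfold Spec_solve
  have hm : ((n.toNat : Nat) : Int) = n := Int.toNat_of_nonneg hpre
  rw [solve_eq_gh n hpre]
  show _ = (solveAltLoop 0 1 n, n - solveAltLoop 0 1 n)
  have hloop := solveAltLoop_eq n.toNat 0 1
  rw [hm] at hloop
  rw [hloop]
  have := gN_add_hN n.toNat
  simp only [Prod.mk.injEq]
  constructor <;> omega
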